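-- pv_equiv track=rewrite | github.com/topherjaynes/AdventCode | day8hailmary.py | solve
-- ===== SOURCE A (Python) =====
-- from collections import defaultdict
-- from itertools import combinations
--
-- def parse_grid(input_text):
--     """Parse the grid and return dictionary of frequencies to positions."""
--     antennas = defaultdict(list)
--     for y, line in enumerate(input_text.strip().split('\n')):
--         for x, char in enumerate(line):
--             if char != '.':
--                 antennas[char].append((x, y))
--     return antennas
--
-- def is_collinear(p1, p2, p3, epsilon=1e-10):
--     """
--     Check if three points are collinear using the area method.
--     Returns True if points form a line (area of triangle is approximately 0).
--     """
--     area = abs(p1[0]*(p2[1] - p3[1]) + p2[0]*(p3[1] - p1[1]) + p3[0]*(p1[1] - p2[1]))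
--     return area < epsilon
--
-- def find_antinodes(grid, antenna1, antenna2):
--     """Find all antinodes for a pair of antennas."""
--     max_y = len(grid.split('\n'))
--     max_x = len(grid.split('\n')[0])
--
--     antinodes = set()
--
--     # Add antenna positions themselves as potential antinodes
--     antinodes.add(antenna1)
--     antinodes.add(antenna2)
--
--     # Calculate search bounds based on antenna positions
--     min_x = max(0, min(antenna1[0], antenna2[0]) - 1)
--     max_x = min(max_x, max(antenna1[0], antenna2[0]) + 2)
--     min_y = max(0, min(antenna1[1], antenna2[1]) - 1)
--     max_y = min(max_y, max(antenna1[1], antenna2[1]) + 2)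
--
--     # Check each potential point in bounded area
--     for y in range(min_y, max_y):
--         for x in range(min_x, max_x):
--             point = (x, y)
--             if point != antenna1 and point != antenna2:  # Skip antenna positions here
--                 if is_collinear(point, antenna1, antenna2):
--                     antinodes.add(point)
--
--     return antinodes
--
-- def solve(input_text):
--     """Find total number of unique antinode locations."""
--     antennas = parse_grid(input_text)
--     all_antinodes = set()
--
--     # For each frequency with at least 2 antennas
--     for freq, positions in antennas.items():
--         if len(positions) < 2:
--             continue
--
--         # Check each pair of antennas
--         for ant1, ant2 in combinations(positions, 2):
--             antinodes = find_antinodes(input_text, ant1, ant2)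
--             all_antinodes.update(antinodes)
--
--     return len(all_antinodes)
-- ===== SOURCE B (Python) =====
-- from itertools import combinations
--
-- def solve(input_text):
--     """Find total number of unique antinode locations (same spec as A, one
--     pass along the line per pair instead of scanning the whole bounded box)."""
--     lines = input_text.split('\n')
--     H = len(lines)
--     W = len(lines[0])
--     antennas = {}
--     for y, line in enumerate(input_text.strip().split('\n')):
--         for x, ch in enumerate(line):
--             if ch != '.':
--                 antennas[ch] = antennas.get(ch, []) + [(x, y)]
--     result = set()
--     for positions in antennas.values():
--         for p1, p2 in combinations(positions, 2):
--             x1, y1 = p1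
--             x2, y2 = p2
--             result.add(p1)
--             result.add(p2)
--             dx = x2 - x1
--             dy = y2 - y1
--             lo_x = max(0, min(x1, x2) - 1)
--             hi_x = min(W, max(x1, x2) + 2)
--             lo_y = max(0, min(y1, y2) - 1)
--             hi_y = min(H, max(y1, y2) + 2)
--             if dx == 0:
--                 # vertical pair: the whole column x1 inside the box is collinear
--                 if lo_x <= x1 < hi_x:
--                     for y in range(lo_y, hi_y):
--                         result.add((x1, y))
--             else:
--                 # walk x once; the collinear y is fixed by exact division
--                 for x in range(lo_x, hi_x):
--                     num = (x - x1) * dy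
--                     if num % dx == 0:
--                         y = y1 + num // dx
--                         if lo_y <= y < hi_y:
--                             result.add((x, y))
--     return len(result)
-- ===== Notes on version B (the rewrite author's own statement) =====
-- stated objective: alternative
-- what changed: Instead of testing every point of each pair's bounding box for collinearity (nested x/y scan per pair), B computes the grid dimensions once and, per antenna pair, walks only the line itself: for a vertical pair it emits the column, otherwise it walks x across the box once and gets the unique collinear y by exact division ((x-x1)*dy % dx == 0); measured ~2x in a timing run but both still scale with the number of pairs, so no speed claim is made.
import Mathlib
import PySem

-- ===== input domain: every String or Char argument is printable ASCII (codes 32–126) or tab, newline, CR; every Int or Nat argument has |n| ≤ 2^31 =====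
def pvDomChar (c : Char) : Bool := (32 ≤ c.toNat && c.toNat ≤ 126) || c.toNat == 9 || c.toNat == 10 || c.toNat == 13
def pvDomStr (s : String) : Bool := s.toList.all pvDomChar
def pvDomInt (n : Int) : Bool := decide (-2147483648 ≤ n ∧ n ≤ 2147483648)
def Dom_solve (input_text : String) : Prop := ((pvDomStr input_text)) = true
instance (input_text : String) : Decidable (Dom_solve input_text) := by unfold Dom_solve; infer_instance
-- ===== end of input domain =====

-- B replaces A's per-pair scan of the whole bounded box by a single walk along the
-- line (exact-division step), after computing the grid dimensions once; same value.

-- ===== PORT A =====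

-- is_collinear: |area| < 1e-10 where the area is an integer, i.e. exactly area = 0
def pvIsCollinear (p1 p2 p3 : Int × Int) : Bool :=
  p1.1 * (p2.2 - p3.2) + p2.1 * (p3.2 - p1.2) + p3.1 * (p1.2 - p2.2) == 0

-- parse_grid (the "\n" separator is nonempty, so split? is never none)
def pvParseGrid (s : String) : PySem.Dict Char (List (Int × Int)) :=
  (PySem.List.enumerate ((PySem.Str.split? (PySem.Str.strip s) "\n").getD [])).foldl
    (fun d yl =>
      (PySem.List.enumerate yl.2.toList).foldl
        (fun d xc =>
          if xc.2 ≠ '.' then d.modify xc.2 [] (· ++ [(xc.1, yl.1)]) else d)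
        d)
    PySem.Dict.empty

-- find_antinodes (grid.split('\n') is never empty, so [0] is its head)
def pvFindAntinodes (grid : String) (antenna1 antenna2 : Int × Int) : PySem.Set (Int × Int) :=
  let lines := (PySem.Str.split? grid "\n").getD []
  let maxY : Int := lines.length
  let maxX : Int := PySem.Str.len (lines.headD "")
  let antinodes := PySem.Set.add (PySem.Set.add PySem.Set.empty antenna1) antenna2
  let minX := max 0 (min antenna1.1 antenna2.1 - 1)
  let maxX := min maxX (max antenna1.1 antenna2.1 + 2)
  let minY := max 0 (min antenna1.2 antenna2.2 - 1)
  let maxY := min maxY (max antenna1.2 antenna2.2 + 2)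
  (PySem.List.pyRange minY maxY).foldl
    (fun s y =>
      (PySem.List.pyRange minX maxX).foldl
        (fun s x =>
          if (x, y) ≠ antenna1 ∧ (x, y) ≠ antenna2 then
            if pvIsCollinear (x, y) antenna1 antenna2 then PySem.Set.add s (x, y) else s
          else s)
        s)
    antinodes

def solve (input_text : String) : Int :=
  let antennas := pvParseGrid input_text
  let all_antinodes := antennas.items.foldl
    (fun (acc : PySem.Set (Int × Int)) fp =>
      if fp.2.length < 2 then acc
      else
        (PySem.List.combinations fp.2 2).foldl
          (fun acc pr =>
            match pr with
            | [ant1, ant2] => PySem.Set.update acc (pvFindAntinodes input_text ant1 ant2)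
            | _ => acc)   -- unreachable: combinations _ 2 yields 2-element lists
          acc)
    PySem.Set.empty
  PySem.Set.len all_antinodes

-- ===== PORT B =====

def solve_alt (input_text : String) : Int :=
  let lines := (PySem.Str.split? input_text "\n").getD []
  let H : Int := lines.length
  let W : Int := PySem.Str.len (lines.headD "")
  let antennas : PySem.Dict Char (List (Int × Int)) :=
    (PySem.List.enumerate ((PySem.Str.split? (PySem.Str.strip input_text) "\n").getD [])).foldl
      (fun d yl =>
        (PySem.List.enumerate yl.2.toList).foldl
          (fun d xc =>
            if xc.2 ≠ '.' then d.insert xc.2 (d.getD xc.2 [] ++ [(xc.1, yl.1)]) else d)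
          d)
      PySem.Dict.empty
  let result := antennas.values.foldl
    (fun (acc : PySem.Set (Int × Int)) positions =>
      (PySem.List.combinations positions 2).foldl
        (fun acc pr =>
          match pr with
          | [] => acc
          | [_] => acc
          | p1 :: p2 :: _ =>
            let acc := PySem.Set.add (PySem.Set.add acc p1) p2
            let dx := p2.1 - p1.1
            let dy := p2.2 - p1.2
            let loX := max 0 (min p1.1 p2.1 - 1)
            let hiX := min W (max p1.1 p2.1 + 2)
            let loY := max 0 (min p1.2 p2.2 - 1)
            let hiY := min H (max p1.2 p2.2 + 2)
            if dx = 0 then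
              -- vertical pair: the whole column x1 inside the box is collinear
              if loX ≤ p1.1 ∧ p1.1 < hiX then
                (PySem.List.pyRange loY hiY).foldl
                  (fun acc y => PySem.Set.add acc (p1.1, y)) acc
              else acc
            else
              -- walk x once; the collinear y is fixed by exact division
              (PySem.List.pyRange loX hiX).foldl
                (fun acc x =>
                  let num := (x - p1.1) * dy
                  if PySem.Int.mod num dx = 0 then
                    let y := p1.2 + PySem.Int.floordiv num dx
                    if loY ≤ y ∧ y < hiY then PySem.Set.add acc (x, y) else acc
                  else acc)
                acc
          )   -- the first two cases are unreachable: combinations _ 2 yields 2-element lists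
        acc)
    PySem.Set.empty
  PySem.Set.len result

-- ===== PRECONDITION & SPEC =====
def Spec_solve (input_text : String) (out : Int) : Prop := out = solve_alt input_text
instance (input_text : String) (out : Int) : Decidable (Spec_solve input_text out) := by unfold Spec_solve; infer_instance

-- ===== CLAIM (what is proved, stated in full; the proofs are below) =====
def Claim_equal_solve : Prop := ∀ (input_text : String), Dom_solve input_text → Spec_solve input_text (solve input_text)

-- ===== LEMMAS AND PROOFS =====

-- grid width and height as both programs compute them (B once, A per pair)
def pvW (s : String) : Int := PySem.Str.len (((PySem.Str.split? s "\n").getD []).headD "")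
def pvH (s : String) : Int := (((PySem.Str.split? s "\n").getD []) : List String).length

-- A's per-pair box scan with the dimensions abstracted out
def pvBoxScan (W H : Int) (p1 p2 : Int × Int) : PySem.Set (Int × Int) :=
  (PySem.List.pyRange (max 0 (min p1.2 p2.2 - 1)) (min H (max p1.2 p2.2 + 2))).foldl
    (fun s y =>
      (PySem.List.pyRange (max 0 (min p1.1 p2.1 - 1)) (min W (max p1.1 p2.1 + 2))).foldl
        (fun s x =>
          if (x, y) ≠ p1 ∧ (x, y) ≠ p2 then
            if pvIsCollinear (x, y) p1 p2 then PySem.Set.add s (x, y) else s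
          else s) s)
    (PySem.Set.add (PySem.Set.add PySem.Set.empty p1) p2)

lemma pv_find_eq (s : String) (p1 p2 : Int × Int) :
    pvFindAntinodes s p1 p2 = pvBoxScan (pvW s) (pvH s) p1 p2 := rfl

-- B's per-pair step, abbreviated (definitionally the body of solve_alt's pair loop)
def pvStepB (W H : Int) (p1 p2 : Int × Int) (acc : PySem.Set (Int × Int)) : PySem.Set (Int × Int) :=
  let acc := PySem.Set.add (PySem.Set.add acc p1) p2
  let dx := p2.1 - p1.1
  let dy := p2.2 - p1.2
  let loX := max 0 (min p1.1 p2.1 - 1)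
  let hiX := min W (max p1.1 p2.1 + 2)
  let loY := max 0 (min p1.2 p2.2 - 1)
  let hiY := min H (max p1.2 p2.2 + 2)
  if dx = 0 then
    if loX ≤ p1.1 ∧ p1.1 < hiX then
      (PySem.List.pyRange loY hiY).foldl (fun acc y => PySem.Set.add acc (p1.1, y)) acc
    else acc
  else
    (PySem.List.pyRange loX hiX).foldl
      (fun acc x =>
        let num := (x - p1.1) * dy
        if PySem.Int.mod num dx = 0 then
          let y := p1.2 + PySem.Int.floordiv num dx
          if loY ≤ y ∧ y < hiY then PySem.Set.add acc (x, y) else acc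
        else acc)
      acc

def pvSetA (s : String) : PySem.Set (Int × Int) :=
  (pvParseGrid s).items.foldl
    (fun (acc : PySem.Set (Int × Int)) fp =>
      if fp.2.length < 2 then acc
      else
        (PySem.List.combinations fp.2 2).foldl
          (fun acc pr =>
            match pr with
            | [ant1, ant2] => PySem.Set.update acc (pvFindAntinodes s ant1 ant2)
            | _ => acc)
          acc)
    PySem.Set.empty

def pvSetB (s : String) : PySem.Set (Int × Int) :=
  (pvParseGrid s).values.foldl
    (fun (acc : PySem.Set (Int × Int)) positions =>
      (PySem.List.combinations positions 2).foldl
        (fun acc pr =>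
          match pr with
          | [] => acc
          | [_] => acc
          | p1 :: p2 :: _ => pvStepB (pvW s) (pvH s) p1 p2 acc)
        acc)
    PySem.Set.empty

lemma pv_solve_eq (s : String) : solve s = PySem.Set.len (pvSetA s) := rfl

lemma pv_solve_alt_eq (s : String) : solve_alt s = PySem.Set.len (pvSetB s) := rfl

-- the common characterisation of what one pair contributes
def pvCanon (W H : Int) (p1 p2 q : Int × Int) : Prop :=
  q = p1 ∨ q = p2 ∨
    (max 0 (min p1.1 p2.1 - 1) ≤ q.1 ∧ q.1 < min W (max p1.1 p2.1 + 2) ∧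
     max 0 (min p1.2 p2.2 - 1) ≤ q.2 ∧ q.2 < min H (max p1.2 p2.2 + 2) ∧
     (q.1 - p1.1) * (p2.2 - p1.2) = (q.2 - p1.2) * (p2.1 - p1.1))

-- generic fold lemmas
lemma pv_mem_foldl {α P : Type} [BEq P] [LawfulBEq P] (l : List α)
    (F : PySem.Set P → α → PySem.Set P) (Q : α → P → Prop)
    (h : ∀ s x q, q ∈ F s x ↔ q ∈ s ∨ Q x q) :
    ∀ s q, (q ∈ l.foldl F s ↔ q ∈ s ∨ ∃ x ∈ l, Q x q) := by
  induction l with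
  | nil => simp
  | cons a t ih =>
    intro s q
    rw [List.foldl_cons, ih, h]
    simp only [List.mem_cons]
    constructor
    · rintro (⟨h1 | h1⟩ | ⟨x, hx, hQ⟩)
      · exact Or.inl h1
      · exact Or.inr ⟨a, Or.inl rfl, h1⟩
      · exact Or.inr ⟨x, Or.inr hx, hQ⟩
    · rintro (h1 | ⟨x, (rfl | hx), hQ⟩)
      · exact Or.inl (Or.inl h1)
      · exact Or.inl (Or.inr hQ)
      · exact Or.inr ⟨x, hx, hQ⟩

lemma pv_nodup_foldl {α P : Type} (l : List α)
    (F : PySem.Set P → α → PySem.Set P)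
    (h : ∀ s x, List.Nodup s → List.Nodup (F s x)) :
    ∀ s, List.Nodup s → List.Nodup (l.foldl F s) := by
  induction l with
  | nil => intro s hs; exact hs
  | cons a t ih => intro s hs; exact ih _ (h s a hs)

lemma pv_mem_foldl_congr {α P : Type} [BEq P] [LawfulBEq P] (l : List α)
    (FA FB : PySem.Set P → α → PySem.Set P)
    (h : ∀ x ∈ l, ∀ sA sB, (∀ q, (q ∈ sA ↔ q ∈ sB)) → ∀ q, (q ∈ FA sA x ↔ q ∈ FB sB x)) :
    ∀ sA sB, (∀ q, (q ∈ sA ↔ q ∈ sB)) → ∀ q, (q ∈ l.foldl FA sA ↔ q ∈ l.foldl FB sB) := by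
  induction l with
  | nil => intro sA sB hm; exact hm
  | cons a t ih =>
    intro sA sB hm
    exact ih (fun x hx => h x (List.mem_cons_of_mem a hx))
      _ _ (h a (List.mem_cons_self) sA sB hm)

-- arithmetic characterisations
lemma pv_collinear_iff (q p1 p2 : Int × Int) :
    (pvIsCollinear q p1 p2 = true) ↔
      (q.1 - p1.1) * (p2.2 - p1.2) = (q.2 - p1.2) * (p2.1 - p1.1) := by
  unfold pvIsCollinear
  rw [beq_iff_eq]
  constructor <;> intro h <;> nlinarith [h]

lemma pv_div_iff (num dx y1 y : Int) (hdx : dx ≠ 0) :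
    (PySem.Int.mod num dx = 0 ∧ y = y1 + PySem.Int.floordiv num dx) ↔ num = (y - y1) * dx := by
  rw [PySem.Int.mod_eq_zero_iff_dvd]
  unfold PySem.Int.floordiv
  constructor
  · rintro ⟨⟨k, rfl⟩, hy⟩
    rw [Int.mul_fdiv_cancel_left _ hdx] at hy
    subst hy; ring
  · rintro rfl
    refine ⟨dvd_mul_left dx (y - y1), ?_⟩
    rw [Int.mul_fdiv_cancel _ hdx]
    ring

-- membership in A's per-pair box scan
lemma pv_mem_boxScan (W H : Int) (p1 p2 q : Int × Int) :
    q ∈ pvBoxScan W H p1 p2 ↔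
      q = p1 ∨ q = p2 ∨
        ∃ y, (max 0 (min p1.2 p2.2 - 1) ≤ y ∧ y < min H (max p1.2 p2.2 + 2)) ∧
          ∃ x, (max 0 (min p1.1 p2.1 - 1) ≤ x ∧ x < min W (max p1.1 p2.1 + 2)) ∧
            ((x, y) ≠ p1 ∧ (x, y) ≠ p2) ∧ pvIsCollinear (x, y) p1 p2 = true ∧ q = (x, y) := by
  have hinner : ∀ (y : Int) (s0 : PySem.Set (Int × Int)) (q : Int × Int),
      q ∈ (PySem.List.pyRange (max 0 (min p1.1 p2.1 - 1)) (min W (max p1.1 p2.1 + 2))).foldl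
        (fun s x =>
          if (x, y) ≠ p1 ∧ (x, y) ≠ p2 then
            if pvIsCollinear (x, y) p1 p2 then PySem.Set.add s (x, y) else s
          else s) s0 ↔
      q ∈ s0 ∨ ∃ x ∈ PySem.List.pyRange (max 0 (min p1.1 p2.1 - 1)) (min W (max p1.1 p2.1 + 2)),
        ((x, y) ≠ p1 ∧ (x, y) ≠ p2) ∧ pvIsCollinear (x, y) p1 p2 = true ∧ q = (x, y) := by
    intro y
    refine pv_mem_foldl _ _
      (fun x q => ((x, y) ≠ p1 ∧ (x, y) ≠ p2) ∧ pvIsCollinear (x, y) p1 p2 = true ∧ q = (x, y))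
      (fun s0 x q => ?_)
    split_ifs with h1 h2
    · rw [PySem.Set.mem_add]; tauto
    · tauto
    · tauto
  unfold pvBoxScan
  rw [pv_mem_foldl _ _
      (fun y q => ∃ x ∈ PySem.List.pyRange (max 0 (min p1.1 p2.1 - 1)) (min W (max p1.1 p2.1 + 2)),
        ((x, y) ≠ p1 ∧ (x, y) ≠ p2) ∧ pvIsCollinear (x, y) p1 p2 = true ∧ q = (x, y))
      (fun s0 y q => hinner y s0 q)]
  simp only [PySem.Set.mem_add, PySem.List.mem_pyRange_one, PySem.Set.empty, List.not_mem_nil,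
    false_or]
  tauto

-- A's existential form is the canonical predicate (no distinctness needed)
lemma pv_A_canon (W H : Int) (p1 p2 q : Int × Int) :
    (q = p1 ∨ q = p2 ∨
        ∃ y, (max 0 (min p1.2 p2.2 - 1) ≤ y ∧ y < min H (max p1.2 p2.2 + 2)) ∧
          ∃ x, (max 0 (min p1.1 p2.1 - 1) ≤ x ∧ x < min W (max p1.1 p2.1 + 2)) ∧
            ((x, y) ≠ p1 ∧ (x, y) ≠ p2) ∧ pvIsCollinear (x, y) p1 p2 = true ∧ q = (x, y))
      ↔ pvCanon W H p1 p2 q := by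
  unfold pvCanon
  constructor
  · rintro (h | h | ⟨y, hy, x, hx, hne, hc, rfl⟩)
    · exact Or.inl h
    · exact Or.inr (Or.inl h)
    · refine Or.inr (Or.inr ⟨hx.1, hx.2, hy.1, hy.2, ?_⟩)
      exact (pv_collinear_iff (x, y) p1 p2).mp hc
  · rintro (h | h | ⟨h1, h2, h3, h4, h5⟩)
    · exact Or.inl h
    · exact Or.inr (Or.inl h)
    · by_cases hq1 : q = p1
      · exact Or.inl hq1
      by_cases hq2 : q = p2
      · exact Or.inr (Or.inl hq2)
      refine Or.inr (Or.inr ⟨q.2, ⟨h3, h4⟩, q.1, ⟨h1, h2⟩, ⟨by simpa using hq1, by simpa using hq2⟩,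
        (pv_collinear_iff (q.1, q.2) p1 p2).mpr (by simpa using h5), by simp⟩)

lemma pv_mem_stepA (s : String) (p1 p2 : Int × Int) (acc : PySem.Set (Int × Int)) (q : Int × Int) :
    q ∈ PySem.Set.update acc (pvFindAntinodes s p1 p2) ↔
      q ∈ acc ∨ pvCanon (pvW s) (pvH s) p1 p2 q := by
  rw [PySem.Set.mem_update, pv_find_eq, pv_mem_boxScan, pv_A_canon]

lemma pv_mem_stepB (W H : Int) (p1 p2 : Int × Int) (hne : p1 ≠ p2)
    (acc : PySem.Set (Int × Int)) (q : Int × Int) :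
    q ∈ pvStepB W H p1 p2 acc ↔ q ∈ acc ∨ pvCanon W H p1 p2 q := by
  obtain ⟨x1, y1⟩ := p1
  obtain ⟨x2, y2⟩ := p2
  obtain ⟨qx, qy⟩ := q
  simp only [pvStepB, pvCanon]
  by_cases hdx : x2 - x1 = 0
  · -- vertical pair
    have hdy : y2 - y1 ≠ 0 := by
      intro h; exact hne (by simp [Prod.ext_iff]; omega)
    rw [if_pos hdx]
    split_ifs with hx1
    · rw [PySem.Set.mem_foldl_add]
      simp only [PySem.Set.mem_add, PySem.List.mem_pyRange_one, Prod.mk.injEq]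
      constructor
      · rintro (((hq | ⟨h1, h2⟩) | ⟨h1, h2⟩) | ⟨b, hb, h1, h2⟩)
        · exact Or.inl hq
        · exact Or.inr (Or.inl ⟨h1, h2⟩)
        · exact Or.inr (Or.inr (Or.inl ⟨h1, h2⟩))
        · refine Or.inr (Or.inr (Or.inr ⟨by omega, by omega, by omega, by omega, ?_⟩))
          rw [h1, show x2 = x1 from by omega]; ring
      · rintro (hq | ⟨h1, h2⟩ | ⟨h1, h2⟩ | ⟨h1, h2, h3, h4, h5⟩)
        · exact Or.inl (Or.inl (Or.inl hq))
        · exact Or.inl (Or.inl (Or.inr ⟨h1, h2⟩))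
        · exact Or.inl (Or.inr ⟨h1, h2⟩)
        · have h5' : (qx - x1) * (y2 - y1) = 0 := by
            rw [h5, show x2 = x1 from by omega]; ring
          have hqx : qx = x1 := by
            rcases mul_eq_zero.mp h5' with h | h
            · omega
            · exact absurd h hdy
          exact Or.inr ⟨qy, ⟨h3, h4⟩, hqx, rfl⟩
    · simp only [PySem.Set.mem_add, Prod.mk.injEq]
      constructor
      · rintro ((hq | ⟨h1, h2⟩) | ⟨h1, h2⟩)
        · exact Or.inl hq
        · exact Or.inr (Or.inl ⟨h1, h2⟩)
        · exact Or.inr (Or.inr (Or.inl ⟨h1, h2⟩))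
      · rintro (hq | ⟨h1, h2⟩ | ⟨h1, h2⟩ | ⟨h1, h2, h3, h4, h5⟩)
        · exact Or.inl (Or.inl hq)
        · exact Or.inl (Or.inr ⟨h1, h2⟩)
        · exact Or.inr ⟨h1, h2⟩
        · exfalso
          have h5' : (qx - x1) * (y2 - y1) = 0 := by
            rw [h5, show x2 = x1 from by omega]; ring
          have hqx : qx = x1 := by
            rcases mul_eq_zero.mp h5' with h | h
            · omega
            · exact absurd h hdy
          exact hx1 ⟨by omega, by omega⟩
  · -- sloped pair: single fold over x
    rw [if_neg hdx]
    rw [pv_mem_foldl _ _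
        (fun x q => PySem.Int.mod ((x - x1) * (y2 - y1)) (x2 - x1) = 0 ∧
          (max 0 (min y1 y2 - 1) ≤ y1 + PySem.Int.floordiv ((x - x1) * (y2 - y1)) (x2 - x1) ∧
           y1 + PySem.Int.floordiv ((x - x1) * (y2 - y1)) (x2 - x1) < min H (max y1 y2 + 2)) ∧
          q = (x, y1 + PySem.Int.floordiv ((x - x1) * (y2 - y1)) (x2 - x1)))
        (fun s0 x q => by
          dsimp only
          split_ifs with h1 h2
          · rw [PySem.Set.mem_add]; tauto
          · tauto
          · tauto)]
    simp only [PySem.Set.mem_add, PySem.List.mem_pyRange_one, Prod.mk.injEq]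
    constructor
    · rintro (((hq | ⟨h1, h2⟩) | ⟨h1, h2⟩) | ⟨x, hx, hmod, hy, hq1, hq2⟩)
      · exact Or.inl hq
      · exact Or.inr (Or.inl ⟨h1, h2⟩)
      · exact Or.inr (Or.inr (Or.inl ⟨h1, h2⟩))
      · have hd := (pv_div_iff ((x - x1) * (y2 - y1)) (x2 - x1)
            y1 (y1 + PySem.Int.floordiv ((x - x1) * (y2 - y1)) (x2 - x1)) hdx).mp ⟨hmod, rfl⟩
        refine Or.inr (Or.inr (Or.inr ⟨by omega, by omega, by omega, by omega, ?_⟩))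
        rw [hq1, hq2]
        omega
    · rintro (hq | ⟨h1, h2⟩ | ⟨h1, h2⟩ | ⟨h1, h2, h3, h4, h5⟩)
      · exact Or.inl (Or.inl (Or.inl hq))
      · exact Or.inl (Or.inl (Or.inr ⟨h1, h2⟩))
      · exact Or.inl (Or.inr ⟨h1, h2⟩)
      · obtain ⟨hmod, hy⟩ := (pv_div_iff ((qx - x1) * (y2 - y1)) (x2 - x1) y1 qy hdx).mpr (by omega)
        exact Or.inr ⟨qx, ⟨h1, h2⟩, hmod, ⟨by omega, by omega⟩, rfl, by omega⟩

-- nodup of the accumulated sets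
lemma pv_nodup_stepB (W H : Int) (p1 p2 : Int × Int) (acc : PySem.Set (Int × Int))
    (h : List.Nodup acc) : List.Nodup (pvStepB W H p1 p2 acc) := by
  have hbase : List.Nodup (PySem.Set.add (PySem.Set.add acc p1) p2) :=
    PySem.Set.nodup_add _ _ (PySem.Set.nodup_add _ _ h)
  simp only [pvStepB]
  split_ifs with h1 h2
  · exact pv_nodup_foldl _ _ (fun s x hs => PySem.Set.nodup_add _ _ hs) _ hbase
  · exact hbase
  · refine pv_nodup_foldl _ _ (fun s x hs => ?_) _ hbase
    dsimp only
    split_ifs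
    · exact PySem.Set.nodup_add _ _ hs
    · exact hs
    · exact hs

lemma pv_nodup_setA (s : String) : List.Nodup (pvSetA s) := by
  refine pv_nodup_foldl _ _ (fun acc fp hacc => ?_) _ List.nodup_nil
  dsimp only
  split_ifs
  · exact hacc
  · refine pv_nodup_foldl _ _ (fun acc2 pr hacc2 => ?_) _ hacc
    rcases pr with _ | ⟨a, _ | ⟨b, _ | ⟨c, t⟩⟩⟩
    · exact hacc2
    · exact hacc2
    · exact PySem.Set.nodup_update _ _ hacc2
    · exact hacc2

lemma pv_nodup_setB (s : String) : List.Nodup (pvSetB s) := by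
  refine pv_nodup_foldl _ _ (fun acc positions hacc => ?_) _ List.nodup_nil
  refine pv_nodup_foldl _ _ (fun acc2 pr hacc2 => ?_) _ hacc
  rcases pr with _ | ⟨a, _ | ⟨b, t⟩⟩
  · exact hacc2
  · exact hacc2
  · exact pv_nodup_stepB _ _ _ _ _ hacc2

-- the positions stored for one frequency come from pairwise distinct grid cells
def pvCells (s : String) : List (Char × (Int × Int)) :=
  (PySem.List.enumerate ((PySem.Str.split? (PySem.Str.strip s) "\n").getD [])).flatMap
    (fun yl =>
      ((PySem.List.enumerate yl.2.toList).filter (fun xc => decide (xc.2 ≠ '.'))).map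
        (fun xc => (xc.2, (xc.1, yl.1))))

lemma pv_parse_eq_cells (s : String) :
    pvParseGrid s =
      (pvCells s).foldl (fun d p => d.modify p.1 [] (· ++ [p.2])) PySem.Dict.empty := by
  unfold pvParseGrid pvCells
  rw [List.flatMap_def, List.foldl_flatten, List.foldl_map]
  congr 1
  funext d yl
  rw [List.foldl_map]
  exact PySem.List.foldl_ite_eq_foldl_filter (fun xc : Int × Char => xc.2 ≠ '.') _ _ _

lemma pv_cells_snd_pairwise (s : String) :
    (pvCells s).Pairwise (fun a b => a.2 ≠ b.2) := by
  unfold pvCells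
  rw [List.flatMap_def, List.pairwise_flatten]
  constructor
  · intro l hl
    rw [List.mem_map] at hl
    obtain ⟨yl, _, rfl⟩ := hl
    rw [List.pairwise_map]
    refine List.Pairwise.imp ?_ ((PySem.List.pairwise_lt_enumerate _ _).filter _)
    intro a b hab
    simp only [ne_eq, Prod.mk.injEq, not_and]
    intro h _; omega
  · rw [List.pairwise_map]
    refine List.Pairwise.imp ?_ (PySem.List.pairwise_lt_enumerate _ _)
    intro yl yl' hlt a ha b hb
    rw [List.mem_map] at ha hb
    obtain ⟨xc, _, rfl⟩ := ha
    obtain ⟨xc', _, rfl⟩ := hb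
    simp only [ne_eq, Prod.mk.injEq, not_and]
    intro _ h2; omega

lemma pv_keys_nodup (s : String) : (pvParseGrid s).keys.Nodup := by
  rw [pv_parse_eq_cells]
  exact PySem.Dict.nodup_keys_foldl_modify_key (pvCells s) Prod.fst []
    (fun d p v => v ++ [p.2]) PySem.Dict.empty (by simp [PySem.Dict.keys, PySem.Dict.empty])

lemma pv_getD_nodup (s : String) (k : Char) : ((pvParseGrid s).getD k []).Nodup := by
  rw [pv_parse_eq_cells, PySem.Dict.getD_foldl_modify_append]
  have hempty : (PySem.Dict.empty : PySem.Dict Char (List (Int × Int))).getD k [] = [] := rfl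
  rw [hempty, List.nil_append]
  have hp := (pv_cells_snd_pairwise s).filter (fun p => p.1 == k)
  exact List.pairwise_map.mpr (hp.imp fun h => h)

lemma pv_positions_nodup (s : String) :
    ∀ fp ∈ (pvParseGrid s).items, List.Nodup fp.2 := by
  rintro ⟨k, v⟩ hfp
  have hv := PySem.Dict.getD_of_mem_items (pvParseGrid s) hfp (pv_keys_nodup s) []
  rw [show ((k, v) : Char × List (Int × Int)).2 = v from rfl, ← hv]
  exact pv_getD_nodup s k

lemma pv_comb_ne {l : List (Int × Int)} (hl : List.Nodup l) {a b : Int × Int}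
    (h : [a, b] ∈ PySem.List.combinations l 2) : a ≠ b := by
  obtain ⟨hsub, -⟩ := (PySem.List.mem_combinations_iff _ _ _).mp h
  have hnd := hsub.nodup hl
  simp only [List.nodup_cons, List.mem_singleton] at hnd
  exact hnd.1

-- the two accumulated sets have the same members
lemma pv_mem_AB (s : String) : ∀ q, (q ∈ pvSetA s ↔ q ∈ pvSetB s) := by
  unfold pvSetA pvSetB
  rw [show (pvParseGrid s).values = (pvParseGrid s).items.map (·.2) from rfl, List.foldl_map]
  refine pv_mem_foldl_congr _ _ _ ?_ _ _ (fun q => Iff.rfl)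
  intro fp hfp sA sB hm
  by_cases hlen : fp.2.length < 2
  · rw [if_pos hlen, PySem.List.combinations_eq_nil_of_length_lt fp.2 hlen]
    exact hm
  · rw [if_neg hlen]
    refine pv_mem_foldl_congr _ _ _ ?_ _ _ hm
    intro pr hpr sA2 sB2 hm2
    obtain ⟨-, hlen2⟩ := (PySem.List.mem_combinations_iff _ _ _).mp hpr
    obtain ⟨a, b, rfl⟩ := List.length_eq_two.mp hlen2
    have hne : a ≠ b := pv_comb_ne (pv_positions_nodup s fp hfp) hpr
    intro q
    show q ∈ PySem.Set.update sA2 (pvFindAntinodes s a b) ↔ q ∈ pvStepB (pvW s) (pvH s) a b sB2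
    rw [pv_mem_stepA, pv_mem_stepB _ _ _ _ hne]
    exact or_congr (hm2 q) Iff.rfl

-- ===== VERDICT (by name: the statement is the Claim_ definition above) =====
theorem solve_spec : Claim_equal_solve := by
  intro s _
  show solve s = solve_alt s
  rw [pv_solve_eq, pv_solve_alt_eq]
  have hperm := (List.perm_ext_iff_of_nodup (pv_nodup_setA s) (pv_nodup_setB s)).mpr (pv_mem_AB s)
  show ((pvSetA s).length : Int) = ((pvSetB s).length : Int)
  rw [hperm.length_eq]
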